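-- pv_equiv track=rewrite | github.com/proparkin/elvicto-pgs-parkin | PGS_FTP/anpr_api.py | fix_common_ocr_mistakes
-- ===== SOURCE A (Python) =====
-- def fix_common_ocr_mistakes(text, position=None):
--     """Fix common OCR character confusions based on position"""
--     if not text:
--         return text
--
--     text = list(text)
--
--     # First 2 positions: Must be LETTERS (state code like KL, HR)
--     if position == 'state' or (position is None and len(text) >= 2):
--         for i in range(min(2, len(text))):
--             if text[i].isdigit():
--                 replacements = {'0': 'O', '1': 'I', '5': 'S', '8': 'B', '6': 'G'}
--                 text[i] = replacements.get(text[i], text[i])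
--
--     # Positions 2-4: District code (digits, then optional letter)
--     if position == 'district' or (position is None and len(text) >= 4):
--         for i in range(2, min(4, len(text))):
--             if text[i].isalpha() and i < 4:
--                 replacements = {'O': '0', 'I': '1', 'L': '1', 'S': '5', 'B': '8', 'G': '6', 'Z': '2'}
--                 text[i] = replacements.get(text[i], text[i])
--
--     # Last 4 positions: Must be DIGITS
--     if position == 'serial' or (position is None and len(text) >= 4):
--         for i in range(max(0, len(text) - 4), len(text)):
--             if text[i].isalpha():
--                 replacements = {'O': '0', 'I': '1', 'L': '1', 'S': '5', 'B': '8', 'G': '6', 'Z': '2'}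
--                 text[i] = replacements.get(text[i], text[i])
--
--     return ''.join(text)
-- ===== SOURCE B (Python) =====
-- STATE_MAP = {'0': 'O', '1': 'I', '5': 'S', '8': 'B', '6': 'G'}
-- DIGIT_MAP = {'O': '0', 'I': '1', 'L': '1', 'S': '5', 'B': '8', 'G': '6', 'Z': '2'}
--
--
-- def _fix_char(i, ch, n, state_on, district_on, serial_on):
--     """Apply the applicable zone transforms to one character, in zone order."""
--     if state_on and i < 2 and ch.isdigit():
--         ch = STATE_MAP.get(ch, ch)
--     if district_on and 2 <= i < min(4, n) and ch.isalpha():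
--         ch = DIGIT_MAP.get(ch, ch)
--     if serial_on and i >= max(0, n - 4) and ch.isalpha():
--         ch = DIGIT_MAP.get(ch, ch)
--     return ch
--
--
-- def fix_common_ocr_mistakes(text, position=None):
--     """Fix common OCR character confusions based on position"""
--     if not text:
--         return text
--     n = len(text)
--     state_on = position == 'state' or (position is None and n >= 2)
--     district_on = position == 'district' or (position is None and n >= 4)
--     serial_on = position == 'serial' or (position is None and n >= 4)
--     return ''.join(_fix_char(i, ch, n, state_on, district_on, serial_on)
--                    for i, ch in enumerate(text))
-- ===== Notes on version B (the rewrite author's own statement) =====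
-- stated objective: simpler
-- what changed: A makes three sequential in-place range-loop passes over a mutable character list (one per plate zone); B is a single pass that maps each enumerated character through a per-position dispatcher applying the applicable zone transforms in zone order.
import Mathlib
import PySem

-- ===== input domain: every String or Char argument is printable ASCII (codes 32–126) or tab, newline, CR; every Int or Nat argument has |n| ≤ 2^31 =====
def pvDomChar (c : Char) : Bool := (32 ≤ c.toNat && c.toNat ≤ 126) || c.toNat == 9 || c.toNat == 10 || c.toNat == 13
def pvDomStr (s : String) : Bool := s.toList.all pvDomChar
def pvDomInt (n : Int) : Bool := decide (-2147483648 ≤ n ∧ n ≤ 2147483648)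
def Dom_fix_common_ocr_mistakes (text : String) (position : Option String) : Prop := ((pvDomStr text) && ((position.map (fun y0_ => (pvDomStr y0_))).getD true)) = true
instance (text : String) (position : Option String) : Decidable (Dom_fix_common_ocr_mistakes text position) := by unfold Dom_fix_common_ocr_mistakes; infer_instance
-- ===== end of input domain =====

-- B replaces A's three sequential in-place range loops with a single map over the
-- enumerated characters, dispatching the applicable zone transforms per position
-- (objective: simpler one-pass decomposition; same cost). Return-value equivalence
-- only: A mutates a local list, nothing observable to the caller.

-- ===== PORT A =====
-- A's dict literals  {'0': 'O', ...}  /  {'O': '0', ...}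
def pvStateMapA : PySem.Dict Char Char :=
  PySem.Dict.ofList [('0','O'),('1','I'),('5','S'),('8','B'),('6','G')]
def pvDigitMapA : PySem.Dict Char Char :=
  PySem.Dict.ofList [('O','0'),('I','1'),('L','1'),('S','5'),('B','8'),('G','6'),('Z','2')]

-- one Python 'for i in range(lo, hi): text[i] = g(i, text[i])' loop over the mutable list
def pvPassA (g : Nat → Char → Char) (lo hi : Nat) (l : List Char) : List Char :=
  -- index lo is always in range when A runs these loops (range bounds ≤ len);
  -- getD/set are exactly Python's read/write there
  if lo < hi then
    pvPassA g (lo + 1) hi (l.set lo (g lo (l.getD lo ' ')))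
  else l
termination_by hi - lo

-- loop body of pass 1: if text[i].isdigit(): text[i] = replacements.get(text[i], text[i])
def pvBodyState (_i : Nat) (c : Char) : Char :=
  if PySem.Chars.isdigit c then pvStateMapA.getD c c else c
-- loop body of pass 2: if text[i].isalpha() and i < 4: ...
def pvBodyDistrict (i : Nat) (c : Char) : Char :=
  if PySem.Chars.isalpha c && decide (i < 4) then pvDigitMapA.getD c c else c
-- loop body of pass 3: if text[i].isalpha(): ...
def pvBodySerial (_i : Nat) (c : Char) : Char :=
  if PySem.Chars.isalpha c then pvDigitMapA.getD c c else c

def fix_common_ocr_mistakes (text : String) (position : Option String) : String :=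
  if text = "" then text
  else
    let l0 := text.toList
    let n := l0.length
    let l1 := if position == some "state" || (position == none && decide (n ≥ 2)) then
        pvPassA pvBodyState 0 (min 2 n) l0 else l0
    let l2 := if position == some "district" || (position == none && decide (n ≥ 4)) then
        pvPassA pvBodyDistrict 2 (min 4 n) l1 else l1
    let l3 := if position == some "serial" || (position == none && decide (n ≥ 4)) then
        pvPassA pvBodySerial (n - 4) n l2 else l2   -- max(0, n-4) is Nat subtraction
    String.ofList l3

-- ===== PORT B =====
def pvStateMapB : PySem.Dict Char Char :=
  PySem.Dict.ofList [('0','O'),('1','I'),('5','S'),('8','B'),('6','G')]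
def pvDigitMapB : PySem.Dict Char Char :=
  PySem.Dict.ofList [('O','0'),('I','1'),('L','1'),('S','5'),('B','8'),('G','6'),('Z','2')]

-- Source B's _fix_char(i, ch, n, state_on, district_on, serial_on)
def pvFixChar (i : Int) (ch : Char) (n : Nat) (state_on district_on serial_on : Bool) : Char :=
  let ch := if state_on && decide (i < 2) && PySem.Chars.isdigit ch then
      pvStateMapB.getD ch ch else ch
  let ch := if district_on && decide (2 ≤ i ∧ i < min 4 (n : Int)) && PySem.Chars.isalpha ch then
      pvDigitMapB.getD ch ch else ch
  let ch := if serial_on && decide (i ≥ max 0 ((n : Int) - 4)) && PySem.Chars.isalpha ch then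
      pvDigitMapB.getD ch ch else ch
  ch

def fix_common_ocr_mistakes_alt (text : String) (position : Option String) : String :=
  if text = "" then text
  else
    let l := text.toList
    let n := l.length
    let state_on := position == some "state" || (position == none && decide (n ≥ 2))
    let district_on := position == some "district" || (position == none && decide (n ≥ 4))
    let serial_on := position == some "serial" || (position == none && decide (n ≥ 4))
    String.ofList ((PySem.List.enumerate l).map
      (fun p => pvFixChar p.1 p.2 n state_on district_on serial_on))

-- ===== PRECONDITION & SPEC =====
def Spec_fix_common_ocr_mistakes (text : String) (position : Option String) (out : String) : Prop := out = fix_common_ocr_mistakes_alt text position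
instance (text : String) (position : Option String) (out : String) : Decidable (Spec_fix_common_ocr_mistakes text position out) := by unfold Spec_fix_common_ocr_mistakes; infer_instance

-- ===== CLAIM (what is proved, stated in full; the proofs are below) =====
def Claim_equal_fix_common_ocr_mistakes : Prop := ∀ (text : String) (position : Option String), Dom_fix_common_ocr_mistakes text position → Spec_fix_common_ocr_mistakes text position (fix_common_ocr_mistakes text position)

-- ===== LEMMAS AND PROOFS =====

theorem pvPassA_length (g : Nat → Char → Char) (lo hi : Nat) (l : List Char) :
    (pvPassA g lo hi l).length = l.length := by
  rw [pvPassA]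
  split
  · rw [pvPassA_length]
    simp
  · rfl
termination_by hi - lo

theorem pvPassA_getElem? (g : Nat → Char → Char) (lo hi : Nat) (l : List Char) (j : Nat) :
    (pvPassA g lo hi l)[j]? =
      l[j]?.map (fun c => if lo ≤ j ∧ j < hi then g j c else c) := by
  rw [pvPassA]
  split
  · rename_i hlt
    rw [pvPassA_getElem? g (lo + 1) hi _ j]
    by_cases hje : j = lo
    · subst hje
      by_cases hlo : j < l.length
      · rw [List.getElem?_set_self hlo, List.getElem?_eq_getElem hlo]
        have h1 : ¬ (j + 1 ≤ j ∧ j < hi) := by omega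
        have h2 : j ≤ j ∧ j < hi := by omega
        rw [List.getD_eq_getElem?_getD, List.getElem?_eq_getElem hlo]
        simp [h2]
      · rw [List.set_eq_of_length_le (by omega), List.getElem?_eq_none (by omega)]
        rfl
    · rw [List.getElem?_set_ne (by omega)]
      have h3 : (lo + 1 ≤ j ∧ j < hi) ↔ (lo ≤ j ∧ j < hi) := by omega
      simp only [h3]
  · rename_i hge
    have h4 : ¬ (lo ≤ j ∧ j < hi) := by omega
    simp only [h4, if_false]
    cases l[j]? <;> rfl

theorem pvMaps_eq : pvStateMapB = pvStateMapA ∧ pvDigitMapB = pvDigitMapA := ⟨rfl, rfl⟩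

-- per-position agreement of A's three-pass chain with B's _fix_char
set_option maxHeartbeats 1600000 in
theorem pv_pointwise (n j : Nat) (hjn : j < n) (s d r : Bool) (c : Char) :
    (let c1 := if s then (if 0 ≤ j ∧ j < min 2 n then pvBodyState j c else c) else c
     let c2 := if d then (if 2 ≤ j ∧ j < min 4 n then pvBodyDistrict j c1 else c1) else c1
     if r then (if n - 4 ≤ j ∧ j < n then pvBodySerial j c2 else c2) else c2)
    = pvFixChar (j : Int) c n s d r := by
  simp only [pvFixChar, pvBodyState, pvBodyDistrict, pvBodySerial,
    pvMaps_eq.1, pvMaps_eq.2]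
  cases s <;> cases d <;> cases r <;>
    simp only [Bool.true_and, Bool.false_and, if_true, if_false, Bool.false_eq_true,
      Bool.and_eq_true, decide_eq_true_eq] <;>
    split_ifs <;>
    first
      | rfl
      | omega
      | (simp_all only [and_true, true_and, false_and, and_false, not_true,
          not_false_eq_true, Bool.false_eq_true]
         <;> omega)

-- the whole A-side chain, element by element
theorem pvChain_getElem? (l : List Char) (s d r : Bool) (j : Nat) :
    (let n := l.length
     let l1 := if s then pvPassA pvBodyState 0 (min 2 n) l else l
     let l2 := if d then pvPassA pvBodyDistrict 2 (min 4 n) l1 else l1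
     let l3 := if r then pvPassA pvBodySerial (n - 4) n l2 else l2
     l3[j]?) =
    l[j]?.map (fun c => pvFixChar (j : Int) c l.length s d r) := by
  simp only []
  have step : ∀ (b : Bool) (g : Nat → Char → Char) (lo hi : Nat) (m : List Char),
      (if b then pvPassA g lo hi m else m)[j]? =
        m[j]?.map (fun c => if b then (if lo ≤ j ∧ j < hi then g j c else c) else c) := by
    intro b g lo hi m
    cases b
    · simp
    · simp [pvPassA_getElem?]
  rw [step, step, step, Option.map_map, Option.map_map]
  cases hc : l[j]? with
  | none => rfl
  | some c =>
    have hj : j < l.length := (List.getElem?_eq_some_iff.mp hc).1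
    simp only [Option.map_some, Function.comp]
    exact congrArg some (pv_pointwise l.length j hj s d r c)

theorem fix_common_ocr_mistakes_spec' (text : String) (position : Option String) :
    fix_common_ocr_mistakes text position = fix_common_ocr_mistakes_alt text position := by
  unfold fix_common_ocr_mistakes fix_common_ocr_mistakes_alt
  by_cases he : text = ""
  · simp [he]
  · simp only [he, if_false]
    congr 1
    apply List.ext_getElem?
    intro j
    rw [pvChain_getElem? text.toList _ _ _ j]
    rw [List.getElem?_map, PySem.List.getElem?_enumerate]
    cases text.toList[j]? <;> simp

-- ===== VERDICT (by name: the statement is the Claim_ definition above) =====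
theorem fix_common_ocr_mistakes_spec : Claim_equal_fix_common_ocr_mistakes := by
  intro text position _
  exact fix_common_ocr_mistakes_spec' text position
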